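-- pv_equiv track=rewrite | github.com/woduq1414/ps_study | 프로그래머스/2/258711. 도넛과 막대 그래프/도넛과 막대 그래프.py | solution
-- ===== SOURCE A (Python) =====
-- from collections import defaultdict
--
-- def solution(edges):
--     answer = []
--
--     enter_list = defaultdict(list)
--     exit_list = defaultdict(list)
--
--     for edge in edges:
--         enter_list[edge[1]].append(edge[0])
--         exit_list[edge[0]].append(edge[1])
--
--     max_exit_degree = -1
--     max_exit_degree_node = -1
--     for node, exit_node_list in exit_list.items():
--         degree = len(exit_node_list)
--         if degree > max_exit_degree and len(enter_list[node]) == 0: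
--             max_exit_degree_node = node
--             max_exit_degree = degree
--
--
--
--     c1, c2, c3 = 0, 0, 0
--     for node in exit_list[max_exit_degree_node]:
--         if not exit_list[node]:
--             c2 += 1
--         else:
--             new_node = node
--             while True:
--                 new_exit_list = [x for x in exit_list[new_node] ]
--
--                 if len(new_exit_list) == 0:
--                     c2 += 1
--                     break
--
--                 new_node = new_exit_list[0]
--
--
--                 if len(new_exit_list) >= 2:
--                     c3 += 1
--                     break
--                 elif len(new_exit_list) == 0:
--                     c2 += 1
--                     break
--                 elif new_node == node:
--                     c1 += 1
--                     break
--
--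
--
--     answer = [
--         max_exit_degree_node, c1,c2,c3
--     ]
--
--
--     return answer
-- ===== SOURCE B (Python) =====
-- def solution(edges):
--     # dynamic-programming fixpoint: propagate terminal classes through the
--     # out-degree-1 successor map in synchronous rounds; no per-child walking
--     out_deg, in_deg, first = {}, {}, {}
--     for e in edges:
--         a, b = e[0], e[1]
--         out_deg[a] = out_deg.get(a, 0) + 1
--         in_deg[b] = in_deg.get(b, 0) + 1
--         first.setdefault(a, b)
--     gen, best = -1, -1
--     for a, d in out_deg.items():
--         if d > best and in_deg.get(a, 0) == 0:
--             gen, best = a, d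
--     DONUT, STICK, EIGHT = 0, 1, 2
--     ones = [a for a, d in out_deg.items() if d == 1]
--
--     def classify(u):
--         d = out_deg.get(u, 0)
--         if d == 0:
--             return STICK
--         if d >= 2:
--             return EIGHT
--         return cls[u]
--
--     cls = {u: DONUT for u in ones}
--     for _ in range(len(edges)):
--         new = {u: classify(first[u]) for u in ones}
--         if new == cls:
--             break
--         cls = new
--     c = [0, 0, 0]
--     for e in edges:
--         if e[0] == gen:
--             c[classify(e[1])] += 1
--     return [gen, c[DONUT], c[STICK], c[EIGHT]]
-- ===== Notes on version B (the rewrite author's own statement) =====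
-- stated objective: alternative
-- what changed: B replaces A's per-child first-successor walks (while-True chain traversal with early stops) by a dynamic-programming fixpoint: one pass builds out-degree/in-degree/first-successor maps, then synchronous rounds propagate the terminal classes (stick, figure-eight) backwards through the out-degree-1 successor table until stable, and each child's class is read off the finished table instead of being discovered by walking.
import Mathlib
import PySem

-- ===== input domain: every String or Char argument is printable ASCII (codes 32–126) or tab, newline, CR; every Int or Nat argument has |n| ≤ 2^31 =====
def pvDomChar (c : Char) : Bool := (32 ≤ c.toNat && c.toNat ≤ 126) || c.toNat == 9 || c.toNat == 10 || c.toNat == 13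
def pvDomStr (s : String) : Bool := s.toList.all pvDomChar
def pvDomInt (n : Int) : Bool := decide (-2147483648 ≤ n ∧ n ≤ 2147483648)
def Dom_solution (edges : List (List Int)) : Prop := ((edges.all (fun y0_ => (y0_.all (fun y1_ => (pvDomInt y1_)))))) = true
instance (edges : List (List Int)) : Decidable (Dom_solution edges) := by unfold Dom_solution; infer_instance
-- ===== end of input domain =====

-- B replaces A's per-child first-successor walks by a dynamic-programming fixpoint:
-- terminal classes (stick / figure-eight) are propagated backwards through the
-- out-degree-1 successor map in synchronous rounds, then each child's class is read
-- off the finished table (objective: alternative, same result by a different algorithm).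
-- Python A's `while True` walk loops FOREVER on pathological graphs (a chain entering an
-- out-degree-1 cycle that never returns to the start child); both ports are total: A's
-- port bounds the walk by edges.length + 1 steps (counting exhaustion as a donut), B's
-- DP leaves exactly those nodes at the default donut class, so the ports agree there too;
-- on every input where the Python A terminates both ports compute their Python's value.

-- ===== PORT A =====
-- the `while True:` walk of A; one fuel unit per loop iteration, fuel edges.length + 1 given by
-- the caller suffices for every terminating Python run (each continued step is at a distinct
-- out-degree-1 source node, of which there are at most edges.length)
def pvWalkA (exitL : PySem.Dict Int (List Int)) (node : Int) :
    Nat → Int → Int × Int × Int → Int × Int × Int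
  | 0, _, c => (c.1 + 1, c.2.1, c.2.2)
  | fuel + 1, newNode, c =>
      let l := exitL.getD newNode []
      if l = [] then (c.1, c.2.1 + 1, c.2.2)
      else
        if 2 ≤ l.length then (c.1, c.2.1, c.2.2 + 1)
        else if PySem.List.pyGetD l 0 0 = node then (c.1 + 1, c.2.1, c.2.2)
        else pvWalkA exitL node fuel (PySem.List.pyGetD l 0 0) c

-- edge[0] / edge[1] are IndexErrors on a too-short edge (excluded by Pre_); pyGetD's default is
-- never read inside Pre_
def solution (edges : List (List Int)) : List Int :=
  let dicts := edges.foldl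
    (fun (p : PySem.Dict Int (List Int) × PySem.Dict Int (List Int)) edge =>
      (p.1.modify (PySem.List.pyGetD edge 1 0) [] (fun l => l ++ [PySem.List.pyGetD edge 0 0]),
       p.2.modify (PySem.List.pyGetD edge 0 0) [] (fun l => l ++ [PySem.List.pyGetD edge 1 0])))
    (PySem.Dict.empty, PySem.Dict.empty)
  let sel := dicts.2.items.foldl
    (fun (s : Int × Int) kv =>
      if ((kv.2.length : Int) > s.1 ∧ (dicts.1.getD kv.1 []).length = 0)
      then ((kv.2.length : Int), kv.1) else s) (-1, -1)
  let cs := (dicts.2.getD sel.2 []).foldl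
    (fun (c : Int × Int × Int) node =>
      if dicts.2.getD node [] = [] then (c.1, c.2.1 + 1, c.2.2)
      else pvWalkA dicts.2 node (edges.length + 1) node c) (0, 0, 0)
  [sel.2, cs.1, cs.2.1, cs.2.2]

-- ===== PORT B =====
-- B's `classify`: 0 = donut (DONUT), 1 = stick (STICK), 2 = figure-eight (EIGHT);
-- `cls[u]` is read only when u has out-degree 1, so u is always a key of cls: getD is exact
def pvClsB (outDeg cls : PySem.Dict Int Int) (u : Int) : Int :=
  if outDeg.getD u 0 = 0 then 1
  else if 2 ≤ outDeg.getD u 0 then 2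
  else cls.getD u 0

-- one synchronous round: `{u: classify(first[u]) for u in ones}`
def pvStepB (outDeg first : PySem.Dict Int Int) (ones : List Int)
    (cls : PySem.Dict Int Int) : PySem.Dict Int Int :=
  ones.foldl (fun d u => d.insert u (pvClsB outDeg cls (first.getD u 0))) PySem.Dict.empty

-- B's round loop with its early exit (`if new == cls: break`); both compared dicts are
-- comprehensions over the same `ones` list, so Python's order-insensitive dict == coincides
-- with Dict equality here
def pvRoundsB (outDeg first : PySem.Dict Int Int) (ones : List Int) :
    Nat → PySem.Dict Int Int → PySem.Dict Int Int
  | 0, cls => cls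
  | n + 1, cls =>
      let nx := pvStepB outDeg first ones cls
      if nx = cls then cls else pvRoundsB outDeg first ones n nx

def solution_alt (edges : List (List Int)) : List Int :=
  let m := edges.foldl
    (fun (m : PySem.Dict Int Int × PySem.Dict Int Int × PySem.Dict Int Int) e =>
      (m.1.insert (PySem.List.pyGetD e 0 0) (m.1.getD (PySem.List.pyGetD e 0 0) 0 + 1),
       m.2.1.insert (PySem.List.pyGetD e 1 0) (m.2.1.getD (PySem.List.pyGetD e 1 0) 0 + 1),
       m.2.2.setdefault (PySem.List.pyGetD e 0 0) (PySem.List.pyGetD e 1 0)))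
    (PySem.Dict.empty, PySem.Dict.empty, PySem.Dict.empty)
  let g := m.1.items.foldl
    (fun (s : Int × Int) kv =>
      if (kv.2 > s.2 ∧ m.2.1.getD kv.1 0 = 0) then (kv.1, kv.2) else s) (-1, -1)
  let ones := (m.1.items.filter (fun kv => kv.2 == (1 : Int))).map (·.1)
  let cls := pvRoundsB m.1 m.2.2 ones edges.length
    (ones.foldl (fun d u => d.insert u 0) PySem.Dict.empty)
  -- `c[classify(e[1])] += 1` on the 3-list c, written as the if-chain on the class index
  let cs := edges.foldl
    (fun (c : Int × Int × Int) e =>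
      if PySem.List.pyGetD e 0 0 = g.1 then
        let k := pvClsB m.1 cls (PySem.List.pyGetD e 1 0)
        if k = 0 then (c.1 + 1, c.2.1, c.2.2)
        else if k = 1 then (c.1, c.2.1 + 1, c.2.2)
        else (c.1, c.2.1, c.2.2 + 1)
      else c) (0, 0, 0)
  [g.1, cs.1, cs.2.1, cs.2.2]

-- ===== PRECONDITION & SPEC =====
-- Pre_ excludes exactly the edges shorter than two entries, on which Python A (and Python B)
-- raises IndexError at edge[1]
def Pre_solution (edges : List (List Int)) : Prop := ∀ e ∈ edges, 2 ≤ e.length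
instance (edges : List (List Int)) : Decidable (Pre_solution edges) := by
  unfold Pre_solution; infer_instance
def pvWitness_solution : List (List Int) := [[0, 1], [0, 2]]

def Spec_solution (edges : List (List Int)) (out : List Int) : Prop := out = solution_alt edges
instance (edges : List (List Int)) (out : List Int) : Decidable (Spec_solution edges out) := by
  unfold Spec_solution; infer_instance

-- ===== CLAIM (what is proved, stated in full; the proofs are below) =====
def Claim_equal_solution : Prop :=
  ∀ (edges : List (List Int)), Dom_solution edges → Pre_solution edges →
    Spec_solution edges (solution edges)

-- ===== LEMMAS AND PROOFS =====

-- proof-side abbreviations for the builder folds and the edge endpoints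
def pvSrc (e : List Int) : Int := PySem.List.pyGetD e 0 0
def pvDst (e : List Int) : Int := PySem.List.pyGetD e 1 0
def pvPair (e : List Int) : Int × Int := (pvSrc e, pvDst e)
def pvEnterF (d : PySem.Dict Int (List Int)) (e : List Int) : PySem.Dict Int (List Int) :=
  d.modify (PySem.List.pyGetD e 1 0) [] (fun l => l ++ [PySem.List.pyGetD e 0 0])
def pvExitF (d : PySem.Dict Int (List Int)) (e : List Int) : PySem.Dict Int (List Int) :=
  d.modify (PySem.List.pyGetD e 0 0) [] (fun l => l ++ [PySem.List.pyGetD e 1 0])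
def pvOutF (d : PySem.Dict Int Int) (e : List Int) : PySem.Dict Int Int :=
  d.insert (PySem.List.pyGetD e 0 0) (d.getD (PySem.List.pyGetD e 0 0) 0 + 1)
def pvInF (d : PySem.Dict Int Int) (e : List Int) : PySem.Dict Int Int :=
  d.insert (PySem.List.pyGetD e 1 0) (d.getD (PySem.List.pyGetD e 1 0) 0 + 1)
def pvFirstF (d : PySem.Dict Int Int) (e : List Int) : PySem.Dict Int Int :=
  d.setdefault (PySem.List.pyGetD e 0 0) (PySem.List.pyGetD e 1 0)
def pvExit (edges : List (List Int)) : PySem.Dict Int (List Int) :=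
  edges.foldl pvExitF PySem.Dict.empty
def pvEnter (edges : List (List Int)) : PySem.Dict Int (List Int) :=
  edges.foldl pvEnterF PySem.Dict.empty
def pvOut (edges : List (List Int)) : PySem.Dict Int Int :=
  edges.foldl pvOutF PySem.Dict.empty
def pvIn (edges : List (List Int)) : PySem.Dict Int Int :=
  edges.foldl pvInF PySem.Dict.empty
def pvFirst (edges : List (List Int)) : PySem.Dict Int Int :=
  edges.foldl pvFirstF PySem.Dict.empty

-- the successor function and out-degree as plain functions
def pvF (edges : List (List Int)) (u : Int) : Int := (pvFirst edges).getD u 0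
def pvOd (edges : List (List Int)) (u : Int) : Int := (pvOut edges).getD u 0

-- A's walk as a class (0 donut / 1 stick / 2 eight), with the return-to-start check
def pvWc (edges : List (List Int)) (c : Int) : Nat → Int → Int
  | 0, _ => 0
  | f + 1, u =>
      if pvOd edges u = 0 then 1
      else if 2 ≤ pvOd edges u then 2
      else if pvF edges u = c then 0
      else pvWc edges c f (pvF edges u)

-- the pure chain class (no start check): what B's DP rounds compute
def pvWp (edges : List (List Int)) : Nat → Int → Int
  | 0, _ => 0
  | f + 1, u =>
      if pvOd edges u = 0 then 1
      else if 2 ≤ pvOd edges u then 2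
      else pvWp edges f (pvF edges u)

def pvBump (c : Int × Int × Int) (k : Int) : Int × Int × Int :=
  if k = 0 then (c.1 + 1, c.2.1, c.2.2)
  else if k = 1 then (c.1, c.2.1 + 1, c.2.2)
  else (c.1, c.2.1, c.2.2 + 1)

def pvOnes (edges : List (List Int)) : List Int :=
  ((pvOut edges).items.filter (fun kv => kv.2 == (1 : Int))).map (·.1)
def pvInit (edges : List (List Int)) : PySem.Dict Int Int :=
  (pvOnes edges).foldl (fun d u => d.insert u 0) PySem.Dict.empty
def pvClsT (edges : List (List Int)) (t : Nat) : PySem.Dict Int Int :=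
  (pvStepB (pvOut edges) (pvFirst edges) (pvOnes edges))^[t] (pvInit edges)

theorem pvExit_getD (edges : List (List Int)) (c : Int) :
    (pvExit edges).getD c [] =
      ((edges.map pvPair).filter (fun p => p.1 == c)).map (·.2) := by
  have h1 : pvExit edges =
      (edges.map pvPair).foldl (fun d p => d.modify p.1 [] (fun l => l ++ [p.2]))
        PySem.Dict.empty := by
    rw [List.foldl_map]; rfl
  rw [h1, PySem.Dict.getD_foldl_modify_append, PySem.Dict.getD_empty, List.nil_append]

theorem pvEnter_getD (edges : List (List Int)) (c : Int) :
    (pvEnter edges).getD c [] =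
      ((edges.map (fun e => (pvDst e, pvSrc e))).filter (fun p => p.1 == c)).map (·.2) := by
  have h1 : pvEnter edges =
      (edges.map (fun e => (pvDst e, pvSrc e))).foldl
        (fun d p => d.modify p.1 [] (fun l => l ++ [p.2])) PySem.Dict.empty := by
    rw [List.foldl_map]; rfl
  rw [h1, PySem.Dict.getD_foldl_modify_append, PySem.Dict.getD_empty, List.nil_append]

theorem pvOut_getD (edges : List (List Int)) (x : Int) :
    (pvOut edges).getD x 0 = ((edges.map pvSrc).count x : Int) := by
  have h1 : pvOut edges =
      (edges.map pvSrc).foldl (fun d k => d.insert k (d.getD k 0 + 1)) PySem.Dict.empty := by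
    rw [List.foldl_map]; rfl
  rw [h1, PySem.Dict.getD_foldl_insert_add_one, PySem.Dict.getD_empty, zero_add]

theorem pvIn_getD (edges : List (List Int)) (x : Int) :
    (pvIn edges).getD x 0 = ((edges.map pvDst).count x : Int) := by
  have h1 : pvIn edges =
      (edges.map pvDst).foldl (fun d k => d.insert k (d.getD k 0 + 1)) PySem.Dict.empty := by
    rw [List.foldl_map]; rfl
  rw [h1, PySem.Dict.getD_foldl_insert_add_one, PySem.Dict.getD_empty, zero_add]

theorem pvFirst_aux (edges : List (List Int)) (x : Int) :
    ∀ d : PySem.Dict Int Int,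
      (edges.foldl pvFirstF d).get? x =
        (d.get? x).or ((((edges.map pvPair).filter (fun p => p.1 == x)).map (·.2)).head?) := by
  induction edges with
  | nil => intro d; simp
  | cons e rest ih =>
      intro d
      simp only [List.foldl_cons, List.map_cons, List.filter_cons]
      by_cases hx : PySem.List.pyGetD e 0 0 = x
      · have hfil : (pvPair e).1 == x := by simp [pvPair, pvSrc, hx]
        rw [ih]
        simp only [hfil, if_pos, List.map_cons, List.head?_cons]
        have hgd : (pvFirstF d e).get? x = (d.get? x).or (some (PySem.List.pyGetD e 1 0)) := by
          simp only [pvFirstF]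
          rw [hx, PySem.Dict.get?_setdefault_self]
          cases d.get? x <;> rfl
        rw [hgd]
        cases d.get? x <;> simp [pvPair, pvDst]
      · have hfil : ¬((pvPair e).1 == x) := by simp [pvPair, pvSrc, hx]
        rw [ih]
        simp only [hfil]
        have hgd : (pvFirstF d e).get? x = d.get? x := by
          simp only [pvFirstF]
          rcases hc : d.contains (PySem.List.pyGetD e 0 0) with _ | _
          · rw [PySem.Dict.setdefault_of_not_contains d _ hc, PySem.Dict.get?_insert]
            simp [Ne.symm hx]
          · rw [PySem.Dict.setdefault_of_contains d _ hc]
        rw [hgd]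
        simp

theorem pvFirst_get? (edges : List (List Int)) (x : Int) :
    (pvFirst edges).get? x =
      (((edges.map pvPair).filter (fun p => p.1 == x)).map (·.2)).head? := by
  rw [pvFirst, pvFirst_aux edges x PySem.Dict.empty, PySem.Dict.get?_empty]
  rfl

theorem pvLen_exit (edges : List (List Int)) (u : Int) :
    (((pvExit edges).getD u []).length : Int) = (pvOut edges).getD u 0 := by
  rw [pvExit_getD, pvOut_getD]
  simp only [List.length_map, List.count, ← List.countP_eq_length_filter, List.countP_map]
  rfl

theorem pvLen_enter (edges : List (List Int)) (u : Int) :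
    (((pvEnter edges).getD u []).length : Int) = (pvIn edges).getD u 0 := by
  rw [pvEnter_getD, pvIn_getD]
  simp only [List.length_map, List.count, ← List.countP_eq_length_filter, List.countP_map]
  rfl

theorem pvFirst_head (edges : List (List Int)) (u : Int)
    (h : (pvExit edges).getD u [] ≠ []) :
    (pvFirst edges).getD u 0 = PySem.List.pyGetD ((pvExit edges).getD u []) 0 0 := by
  rw [PySem.Dict.getD_eq_get?_getD, pvFirst_get?]
  rw [pvExit_getD] at h ⊢
  rcases hL : ((edges.map pvPair).filter (fun p => p.1 == u)).map (·.2) with _ | ⟨a, t⟩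
  · exact absurd hL h
  · rw [hL]
    simp [PySem.List.pyGetD, PySem.List.pyGet?, PySem.List.pyIdx?]

theorem pvKeys_out (edges : List (List Int)) :
    (pvOut edges).keys = PySem.Set.ofList (edges.map (fun e => PySem.List.pyGetD e 0 0)) := by
  have h := PySem.Dict.keys_foldl_insert_key edges (fun e => PySem.List.pyGetD e 0 0)
    (fun (d : PySem.Dict Int Int) e => d.getD (PySem.List.pyGetD e 0 0) 0 + 1) PySem.Dict.empty
  have e1 : pvOutF = fun (d : PySem.Dict Int Int) (x : List Int) =>
      d.insert (PySem.List.pyGetD x 0 0) (d.getD (PySem.List.pyGetD x 0 0) 0 + 1) := rfl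
  rw [pvOut, e1]
  exact h.trans (by rw [PySem.Dict.keys_empty, PySem.Set.update_nil_left])

theorem pvNodup_exit (edges : List (List Int)) : (pvExit edges).keys.Nodup :=
  PySem.Dict.nodup_keys_foldl_modify_key edges (fun e => PySem.List.pyGetD e 0 0) []
    (fun _ e => fun l => l ++ [PySem.List.pyGetD e 1 0]) PySem.Dict.empty (by simp)

theorem pvNodup_out (edges : List (List Int)) : (pvOut edges).keys.Nodup :=
  PySem.Dict.nodup_keys_foldl_insert_key edges (fun e => PySem.List.pyGetD e 0 0)
    (fun (d : PySem.Dict Int Int) e => d.getD (PySem.List.pyGetD e 0 0) 0 + 1)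
    PySem.Dict.empty (by simp)

theorem pvOd_nonneg (edges : List (List Int)) (u : Int) : 0 ≤ pvOd edges u := by
  rw [pvOd, pvOut_getD]; exact Int.natCast_nonneg _

-- getD of non-keys of pvOut is 0, so membership in `ones` is exactly out-degree 1
theorem pvMem_ones (edges : List (List Int)) (x : Int) :
    x ∈ pvOnes edges ↔ pvOd edges x = 1 := by
  unfold pvOnes
  rw [PySem.Dict.items_eq_map_keys (pvOut edges) (pvNodup_out edges) (0 : Int)]
  constructor
  · intro hx
    rcases List.mem_map.mp hx with ⟨kv, hkv, hfst⟩
    rcases List.mem_filter.mp hkv with ⟨hmem, hval⟩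
    rcases List.mem_map.mp hmem with ⟨k, _, hk⟩
    subst hk
    simp only at hfst hval
    rw [pvOd, ← hfst]
    exact of_decide_eq_true hval
  · intro hx
    have hmemk : x ∈ (pvOut edges).keys := by
      by_contra hnk
      have hcon : (pvOut edges).contains x = false := by
        rw [PySem.Dict.contains_eq_decide_mem_keys]
        simpa using hnk
      have : (pvOut edges).get? x = none :=
        (PySem.Dict.get?_eq_none_iff_contains _ _).mpr hcon
      rw [pvOd, PySem.Dict.getD_eq_get?_getD, this] at hx
      simp at hx
    refine List.mem_map.mpr ⟨(x, (pvOut edges).getD x 0), ?_, rfl⟩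
    refine List.mem_filter.mpr ⟨List.mem_map.mpr ⟨x, hmemk, rfl⟩, ?_⟩
    simpa using hx

-- lookup through a fresh insert-loop over distinct keys computing a function of the key
theorem pvGetD_foldl_insert_fun (f : Int → Int) (x : Int) :
    ∀ (l : List Int) (d : PySem.Dict Int Int),
      (l.foldl (fun d u => d.insert u (f u)) d).getD x 0 =
        if x ∈ l then f x else d.getD x 0 := by
  intro l
  induction l with
  | nil => intro d; simp
  | cons u l ih =>
      intro d
      simp only [List.foldl_cons, ih, List.mem_cons]
      by_cases hl : x ∈ l
      · simp [hl]
      · simp only [hl, or_false]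
        by_cases hu : x = u
        · subst hu
          simp [PySem.Dict.getD_eq_get?_getD, PySem.Dict.get?_insert_self]
        · rw [if_neg hu, PySem.Dict.getD_eq_get?_getD,
            PySem.Dict.get?_insert_of_ne _ _ hu, ← PySem.Dict.getD_eq_get?_getD]
          simp

theorem pvInit_getD (edges : List (List Int)) (x : Int) (hx : x ∈ pvOnes edges) :
    (pvInit edges).getD x 0 = 0 := by
  unfold pvInit
  rw [pvGetD_foldl_insert_fun (fun _ => 0) x (pvOnes edges) PySem.Dict.empty]
  simp [hx]

theorem pvStep_getD (edges : List (List Int)) (cls : PySem.Dict Int Int) (x : Int)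
    (hx : x ∈ pvOnes edges) :
    (pvStepB (pvOut edges) (pvFirst edges) (pvOnes edges) cls).getD x 0 =
      pvClsB (pvOut edges) cls (pvF edges x) := by
  unfold pvStepB
  rw [pvGetD_foldl_insert_fun (fun u => pvClsB (pvOut edges) cls ((pvFirst edges).getD u 0)) x]
  simp [hx, pvF]

-- the break in B's round loop is exact: once a round is a fixpoint, iterating is the identity
theorem pvRounds_eq (outDeg first : PySem.Dict Int Int) (ones : List Int) :
    ∀ (n : Nat) (cls : PySem.Dict Int Int),
      pvRoundsB outDeg first ones n cls = (pvStepB outDeg first ones)^[n] cls := by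
  intro n
  induction n with
  | zero => intro cls; rfl
  | succ k ih =>
      intro cls
      simp only [pvRoundsB]
      by_cases h : pvStepB outDeg first ones cls = cls
      · rw [if_pos h, Function.iterate_succ_apply, h, Function.iterate_fixed h]
      · rw [if_neg h, ih, Function.iterate_succ_apply]

-- after t rounds the table holds exactly the pure chain class started one step in
theorem pvClsT_getD (edges : List (List Int)) :
    ∀ (t : Nat) (x : Int), x ∈ pvOnes edges →
      (pvClsT edges t).getD x 0 = pvWp edges t (pvF edges x) := by
  intro t
  induction t with
  | zero => intro x hx; simpa [pvClsT] using pvInit_getD edges x hx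
  | succ k ih =>
      intro x hx
      have hstep : pvClsT edges (k + 1) =
          pvStepB (pvOut edges) (pvFirst edges) (pvOnes edges) (pvClsT edges k) := by
        simp [pvClsT, Function.iterate_succ_apply']
      rw [hstep, pvStep_getD edges _ x hx]
      have hwp : pvWp edges (k + 1) (pvF edges x) =
          if pvOd edges (pvF edges x) = 0 then 1
          else if 2 ≤ pvOd edges (pvF edges x) then 2
          else pvWp edges k (pvF edges (pvF edges x)) := rfl
      have hcb : pvClsB (pvOut edges) (pvClsT edges k) (pvF edges x) =
          if pvOd edges (pvF edges x) = 0 then 1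
          else if 2 ≤ pvOd edges (pvF edges x) then 2
          else (pvClsT edges k).getD (pvF edges x) 0 := rfl
      rw [hwp, hcb]
      by_cases h0 : pvOd edges (pvF edges x) = 0
      · rw [if_pos h0, if_pos h0]
      · rw [if_neg h0, if_neg h0]
        by_cases h2 : 2 ≤ pvOd edges (pvF edges x)
        · rw [if_pos h2, if_pos h2]
        · rw [if_neg h2, if_neg h2]
          have h1 : pvOd edges (pvF edges x) = 1 := by
            have := pvOd_nonneg edges (pvF edges x); omega
          exact ih _ ((pvMem_ones edges _).mpr h1)

theorem pvIter_mod (g : Int → Int) (c : Int) (p : Nat) (hp : 0 < p) (hfix : g^[p] c = c) :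
    ∀ j, g^[j] c = g^[j % p] c := by
  intro j
  induction j using Nat.strong_induction_on with
  | _ j ih =>
      by_cases hj : j < p
      · rw [Nat.mod_eq_of_lt hj]
      · have hj' : p ≤ j := Nat.le_of_not_lt hj
        have h2 : g^[(j - p) + p] c = g^[j - p] c := by
          rw [Function.iterate_add_apply, hfix]
        have h3 : g^[j] c = g^[j - p] c := by
          rw [← h2]; congr 1; omega
        rw [h3, ih (j - p) (by omega), Nat.mod_eq_sub_mod hj']

theorem pvWp_cycle (edges : List (List Int)) :
    ∀ (f : Nat) (c : Int), (∀ j, pvOd edges ((pvF edges)^[j] c) = 1) →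
      pvWp edges f c = 0 := by
  intro f
  induction f with
  | zero => intro c _; rfl
  | succ k ih =>
      intro c h
      have h0 : pvOd edges c = 1 := by simpa using h 0
      unfold pvWp
      rw [if_neg (by omega), if_neg (by omega)]
      exact ih (pvF edges c) (fun j => by
        have := h (j + 1)
        rwa [Function.iterate_succ_apply] at this)

theorem pvPeriodic (edges : List (List Int)) (c : Int) (p : Nat) (hp : 0 < p)
    (hfix : (pvF edges)^[p] c = c)
    (h : ∀ j < p, pvOd edges ((pvF edges)^[j] c) = 1) :
    ∀ j, pvOd edges ((pvF edges)^[j] c) = 1 := by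
  intro j
  rw [pvIter_mod (pvF edges) c p hp hfix j]
  exact h _ (Nat.mod_lt _ hp)

-- A's walk with the return-to-start check equals the pure chain class, as long as the
-- current node is reached from c through out-degree-1 nodes (a return means a cycle,
-- on which the pure walk also yields donut)
theorem pvWc_eq_Wp (edges : List (List Int)) (c : Int) :
    ∀ (f : Nat) (u : Int) (t : Nat), 1 ≤ t → u = (pvF edges)^[t] c →
      (∀ j < t, pvOd edges ((pvF edges)^[j] c) = 1) →
      pvWc edges c f u = pvWp edges f u := by
  intro f
  induction f with
  | zero => intro u t _ _ _; rfl
  | succ k ih =>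
      intro u t ht hu hall
      unfold pvWc pvWp
      by_cases h0 : pvOd edges u = 0
      · rw [if_pos h0, if_pos h0]
      · by_cases h2 : 2 ≤ pvOd edges u
        · rw [if_neg h0, if_neg h0, if_pos h2, if_pos h2]
        · have h1 : pvOd edges u = 1 := by have := pvOd_nonneg edges u; omega
          rw [if_neg h0, if_neg h0, if_neg h2, if_neg h2]
          by_cases hret : pvF edges u = c
          · rw [if_pos hret]
            have hfix : (pvF edges)^[t + 1] c = c := by
              rw [Function.iterate_succ_apply', ← hu, hret]
            have hall' : ∀ j < t + 1, pvOd edges ((pvF edges)^[j] c) = 1 := by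
              intro j hj
              by_cases hjt : j < t
              · exact hall j hjt
              · have : j = t := by omega
                subst this; rw [← hu]; exact h1
            have hcyc := pvPeriodic edges c (t + 1) (by omega) hfix hall'
            have : pvWp edges k (pvF edges u) = 0 := by
              rw [hret]
              exact pvWp_cycle edges k c hcyc
            rw [this]
          · rw [if_neg hret]
            refine ih (pvF edges u) (t + 1) (by omega) ?_ ?_
            · rw [Function.iterate_succ_apply', ← hu]
            · intro j hj
              by_cases hjt : j < t
              · exact hall j hjt
              · have : j = t := by omega
                subst this; rw [← hu]; exact h1

-- A's fuel walk equals the bump of the class pvWc (mirrors the port step for step)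
theorem pvWalk_eq (edges : List (List Int)) (node : Int) :
    ∀ (fuel : Nat) (u : Int) (c : Int × Int × Int),
      pvWalkA (pvExit edges) node fuel u c = pvBump c (pvWc edges node fuel u) := by
  intro fuel
  induction fuel with
  | zero => intro u c; rfl
  | succ k ih =>
      intro u c
      have hd := pvLen_exit edges u
      by_cases h0 : (pvExit edges).getD u [] = []
      · have hz : pvOd edges u = 0 := by rw [pvOd, ← hd, h0]; rfl
        simp [pvWalkA, pvWc, h0, hz, pvBump]
      · have hne : ¬pvOd edges u = 0 := by
          intro hzz
          rw [pvOd] at hzz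
          rw [hzz] at hd
          exact h0 (List.length_eq_zero_iff.mp (by exact_mod_cast hd))
        by_cases h2 : 2 ≤ ((pvExit edges).getD u []).length
        · have h2' : 2 ≤ pvOd edges u := by rw [pvOd, ← hd]; exact_mod_cast h2
          simp [pvWalkA, pvWc, h0, hne, h2, h2', pvBump]
        · have h2' : ¬(2 ≤ pvOd edges u) := by
            rw [pvOd, ← hd]; intro hc; exact h2 (by exact_mod_cast hc)
          have hfst : (pvFirst edges).getD u 0
              = PySem.List.pyGetD ((pvExit edges).getD u []) 0 0 := pvFirst_head edges u h0
          by_cases heq : PySem.List.pyGetD ((pvExit edges).getD u []) 0 0 = node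
          · simp [pvWalkA, pvWc, pvF, h0, hne, h2, h2', hfst, heq, pvBump]
          · simp only [pvWalkA, pvWc, pvF]
            simp [h0, hne, h2, h2', hfst, heq, ih]

-- the two selection folds keep the same pair with the components swapped
theorem pvSelSwap (K : List Int) (v : Int → Int) (q : Int → Prop) [DecidablePred q] :
    ∀ s : Int × Int,
      K.foldl (fun s k => if (v k > s.1 ∧ q k) then (v k, k) else s) s =
        Prod.swap (K.foldl (fun t k => if (v k > t.2 ∧ q k) then (k, v k) else t) s.swap) := by
  induction K with
  | nil => intro s; simp
  | cons k K ih =>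
      intro s
      simp only [List.foldl_cons]
      rw [ih]
      congr 1
      rcases s with ⟨a, b⟩
      by_cases h : v k > a ∧ q k <;> simp [Prod.swap, h]

def pvSelA (edges : List (List Int)) : Int × Int :=
  (pvExit edges).items.foldl
    (fun (s : Int × Int) kv =>
      if ((kv.2.length : Int) > s.1 ∧ ((pvEnter edges).getD kv.1 []).length = 0)
      then ((kv.2.length : Int), kv.1) else s) (-1, -1)

def pvSelB (edges : List (List Int)) : Int × Int :=
  (pvOut edges).items.foldl
    (fun (s : Int × Int) kv =>
      if (kv.2 > s.2 ∧ (pvIn edges).getD kv.1 0 = 0) then (kv.1, kv.2) else s) (-1, -1)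

def pvCsA (edges : List (List Int)) : Int × Int × Int :=
  ((pvExit edges).getD (pvSelA edges).2 []).foldl
    (fun (c : Int × Int × Int) node =>
      if (pvExit edges).getD node [] = [] then (c.1, c.2.1 + 1, c.2.2)
      else pvWalkA (pvExit edges) node (edges.length + 1) node c) (0, 0, 0)

def pvCls (edges : List (List Int)) : PySem.Dict Int Int :=
  pvRoundsB (pvOut edges) (pvFirst edges) (pvOnes edges) edges.length (pvInit edges)

def pvCsB (edges : List (List Int)) : Int × Int × Int :=
  edges.foldl
    (fun (c : Int × Int × Int) e =>
      if PySem.List.pyGetD e 0 0 = (pvSelB edges).1 then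
        pvBump c (pvClsB (pvOut edges) (pvCls edges) (PySem.List.pyGetD e 1 0))
      else c) (0, 0, 0)

theorem pvKeys_exit (edges : List (List Int)) :
    (pvExit edges).keys = PySem.Set.ofList (edges.map (fun e => PySem.List.pyGetD e 0 0)) := by
  have h := PySem.Dict.keys_foldl_modify_key edges (fun e => PySem.List.pyGetD e 0 0) []
    (fun _ e => fun l => l ++ [PySem.List.pyGetD e 1 0]) PySem.Dict.empty
  have e1 : pvExitF = fun (d : PySem.Dict Int (List Int)) (x : List Int) =>
      d.modify (PySem.List.pyGetD x 0 0) [] fun l => l ++ [PySem.List.pyGetD x 1 0] := rfl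
  rw [pvExit, e1]
  exact h.trans (by rw [PySem.Dict.keys_empty, PySem.Set.update_nil_left])

theorem pvA_unfold (edges : List (List Int)) :
    solution edges = [(pvSelA edges).2, (pvCsA edges).1, (pvCsA edges).2.1, (pvCsA edges).2.2] := by
  unfold solution
  dsimp only []
  have hsplit :
      (List.foldl
        (fun (p : PySem.Dict Int (List Int) × PySem.Dict Int (List Int)) edge =>
          (p.1.modify (PySem.List.pyGetD edge 1 0) [] fun l => l ++ [PySem.List.pyGetD edge 0 0],
           p.2.modify (PySem.List.pyGetD edge 0 0) [] fun l => l ++ [PySem.List.pyGetD edge 1 0]))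
        (PySem.Dict.empty, PySem.Dict.empty) edges) = (pvEnter edges, pvExit edges) :=
    PySem.List.foldl_prod_mk pvEnterF pvExitF edges PySem.Dict.empty PySem.Dict.empty
  rw [hsplit]
  rfl

theorem pvB_unfold (edges : List (List Int)) :
    solution_alt edges =
      [(pvSelB edges).1, (pvCsB edges).1, (pvCsB edges).2.1, (pvCsB edges).2.2] := by
  unfold solution_alt
  dsimp only []
  have hsplit :
      (List.foldl
        (fun (m : PySem.Dict Int Int × PySem.Dict Int Int × PySem.Dict Int Int) e =>
          (m.1.insert (PySem.List.pyGetD e 0 0) (m.1.getD (PySem.List.pyGetD e 0 0) 0 + 1),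
           m.2.1.insert (PySem.List.pyGetD e 1 0) (m.2.1.getD (PySem.List.pyGetD e 1 0) 0 + 1),
           m.2.2.setdefault (PySem.List.pyGetD e 0 0) (PySem.List.pyGetD e 1 0)))
        (PySem.Dict.empty, PySem.Dict.empty, PySem.Dict.empty) edges) =
      (pvOut edges, pvIn edges, pvFirst edges) := by
    have h1 := PySem.List.foldl_prod_mk pvOutF
      (fun (t : PySem.Dict Int Int × PySem.Dict Int Int) e => (pvInF t.1 e, pvFirstF t.2 e))
      edges PySem.Dict.empty (PySem.Dict.empty, PySem.Dict.empty)
    have h2 := PySem.List.foldl_prod_mk pvInF pvFirstF edges PySem.Dict.empty PySem.Dict.empty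
    exact h1.trans (by rw [h2]; rfl)
  rw [hsplit]
  rfl

theorem pvSel_eq (edges : List (List Int)) : pvSelA edges = (pvSelB edges).swap := by
  unfold pvSelA pvSelB
  rw [PySem.Dict.items_eq_map_keys (pvExit edges) (pvNodup_exit edges) ([] : List Int),
      PySem.Dict.items_eq_map_keys (pvOut edges) (pvNodup_out edges) (0 : Int),
      List.foldl_map, List.foldl_map, pvKeys_exit, pvKeys_out]
  dsimp only []
  have hbody : (fun (s : Int × Int) (k : Int) =>
      if ((((pvExit edges).getD k []).length : Int) > s.1 ∧ ((pvEnter edges).getD k []).length = 0)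
      then ((((pvExit edges).getD k []).length : Int), k) else s)
      = (fun (s : Int × Int) (k : Int) =>
      if ((pvOut edges).getD k 0 > s.1 ∧ (pvIn edges).getD k 0 = 0)
      then ((pvOut edges).getD k 0, k) else s) := by
    funext s k
    rw [← pvLen_exit edges k, ← pvLen_enter edges k]
    simp
  rw [hbody]
  exact pvSelSwap _ _ _ (-1, -1)

-- the per-child bodies agree: A's walk class equals B's table lookup
theorem pvChild_eq (edges : List (List Int)) (node : Int) (c : Int × Int × Int) :
    (if (pvExit edges).getD node [] = [] then (c.1, c.2.1 + 1, c.2.2)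
     else pvWalkA (pvExit edges) node (edges.length + 1) node c) =
      pvBump c (pvClsB (pvOut edges) (pvCls edges) node) := by
  have hcls : pvCls edges = pvClsT edges edges.length := by
    rw [pvCls, pvRounds_eq, pvClsT]
  have hd := pvLen_exit edges node
  by_cases h0 : (pvExit edges).getD node [] = []
  · have hz : pvOd edges node = 0 := by rw [pvOd, ← hd, h0]; rfl
    rw [if_pos h0]
    unfold pvClsB
    rw [pvOd] at hz
    rw [hz]
    simp [pvBump]
  · rw [if_neg h0, pvWalk_eq]
    congr 1
    have hne : ¬pvOd edges node = 0 := by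
      intro hzz
      rw [pvOd] at hzz
      rw [hzz] at hd
      exact h0 (List.length_eq_zero_iff.mp (by exact_mod_cast hd))
    unfold pvClsB
    rw [show (pvOut edges).getD node 0 = pvOd edges node from rfl]
    rw [if_neg hne]
    by_cases h2 : 2 ≤ pvOd edges node
    · rw [if_pos h2]
      unfold pvWc
      rw [if_neg hne, if_pos h2]
    · rw [if_neg h2]
      have h1 : pvOd edges node = 1 := by have := pvOd_nonneg edges node; omega
      have hmem : node ∈ pvOnes edges := (pvMem_ones edges _).mpr h1
      rw [hcls, pvClsT_getD edges edges.length node hmem]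
      unfold pvWc
      rw [if_neg hne, if_neg h2]
      by_cases hret : pvF edges node = node
      · rw [if_pos hret, hret]
        have hcyc : ∀ j, pvOd edges ((pvF edges)^[j] node) = 1 :=
          pvPeriodic edges node 1 (by omega) (by simpa using hret)
            (by intro j hj; interval_cases j; simpa using h1)
        exact (pvWp_cycle edges edges.length node hcyc).symm
      · rw [if_neg hret]
        exact pvWc_eq_Wp edges node edges.length (pvF edges node) 1 (le_refl 1)
          (by simp) (by intro j hj; interval_cases j; simpa using h1)

theorem pvCs_eq (edges : List (List Int)) : pvCsA edges = pvCsB edges := by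
  unfold pvCsA pvCsB
  have hgen : (pvSelA edges).2 = (pvSelB edges).1 := by rw [pvSel_eq]; rfl
  rw [hgen]
  have hAbody : (fun (c : Int × Int × Int) (node : Int) =>
      if (pvExit edges).getD node [] = [] then (c.1, c.2.1 + 1, c.2.2)
      else pvWalkA (pvExit edges) node (edges.length + 1) node c)
      = (fun (c : Int × Int × Int) (node : Int) =>
      pvBump c (pvClsB (pvOut edges) (pvCls edges) node)) := by
    funext c node
    exact pvChild_eq edges node c
  rw [hAbody]
  have hB1 : (edges.map pvPair).foldl
      (fun (c : Int × Int × Int) (p : Int × Int) =>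
        if p.1 = (pvSelB edges).1 then
          pvBump c (pvClsB (pvOut edges) (pvCls edges) p.2)
        else c) (0, 0, 0)
      = edges.foldl
      (fun (c : Int × Int × Int) (e : List Int) =>
        if PySem.List.pyGetD e 0 0 = (pvSelB edges).1 then
          pvBump c (pvClsB (pvOut edges) (pvCls edges) (PySem.List.pyGetD e 1 0))
        else c) (0, 0, 0) := List.foldl_map
  rw [← hB1]
  have hB2 : (fun (c : Int × Int × Int) (p : Int × Int) =>
      if p.1 = (pvSelB edges).1 then
        pvBump c (pvClsB (pvOut edges) (pvCls edges) p.2)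
      else c)
      = (fun (c : Int × Int × Int) (p : Int × Int) =>
      if (p.1 == (pvSelB edges).1) = true then
        pvBump c (pvClsB (pvOut edges) (pvCls edges) p.2)
      else c) := by
    funext c p
    by_cases h : p.1 = (pvSelB edges).1 <;> simp [h]
  rw [hB2, ← List.foldl_filter]
  have hB3 : (((edges.map pvPair).filter (fun p => p.1 == (pvSelB edges).1)).map (·.2)).foldl
      (fun (c : Int × Int × Int) (child : Int) =>
        pvBump c (pvClsB (pvOut edges) (pvCls edges) child)) (0, 0, 0)
      = ((edges.map pvPair).filter (fun p => p.1 == (pvSelB edges).1)).foldl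
      (fun (c : Int × Int × Int) (p : Int × Int) =>
        pvBump c (pvClsB (pvOut edges) (pvCls edges) p.2)) (0, 0, 0) := List.foldl_map
  rw [← hB3, ← pvExit_getD]

theorem pv_ports_eq (edges : List (List Int)) : solution edges = solution_alt edges := by
  rw [pvA_unfold, pvB_unfold, pvSel_eq, pvCs_eq]
  rfl

-- ===== VERDICT (by name: the statement is the Claim_ definition above) =====
theorem solution_spec : Claim_equal_solution := by
  intro edges _ _
  unfold Spec_solution
  exact pv_ports_eq edges
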